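-- pv_equiv track=rewrite | github.com/tribixbite/neural-swipe-typing | fix_dataset_quality.py | fix_timing_sequence
-- ===== SOURCE A (Python) =====
-- from typing import List, Dict, Tuple
--
-- def fix_timing_sequence(t_coords: List[int]) -> List[int]:
--     """Ensure monotonic increasing timestamps"""
--     if not t_coords:
--         return t_coords
--
--     fixed_t = [t_coords[0]]
--
--     for i in range(1, len(t_coords)):
--         # Ensure monotonic increase with minimum 1ms increment
--         next_t = max(t_coords[i], fixed_t[-1] + 1)
--         fixed_t.append(next_t)
--
--     return fixed_t
-- ===== SOURCE B (Python) =====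
-- def fix_timing_sequence(t_coords):
--     """Ensure monotonic increasing timestamps, by divide and conquer:
--     fix each half independently, then bump the (already strictly increasing)
--     right half so it starts above the left half's last value."""
--     if not t_coords:
--         return t_coords
--
--     def fix(seg):
--         if len(seg) <= 1:
--             return seg[:]
--         mid = len(seg) // 2
--         left = fix(seg[:mid])
--         right = fix(seg[mid:])
--         base = left[-1] + 1
--         return left + [max(v, base + k) for k, v in enumerate(right)]
--
--     return fix(t_coords)
-- ===== Notes on version B (the rewrite author's own statement) =====
-- stated objective: alternative
-- what changed: Replaces the single left-to-right pass with a divide-and-conquer: fix each half independently, then merge by bumping the already-fixed right half (element k becomes max(v, last_of_left+1+k)), correct because the fixed right half is strictly increasing with step >= 1.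
import Mathlib
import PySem

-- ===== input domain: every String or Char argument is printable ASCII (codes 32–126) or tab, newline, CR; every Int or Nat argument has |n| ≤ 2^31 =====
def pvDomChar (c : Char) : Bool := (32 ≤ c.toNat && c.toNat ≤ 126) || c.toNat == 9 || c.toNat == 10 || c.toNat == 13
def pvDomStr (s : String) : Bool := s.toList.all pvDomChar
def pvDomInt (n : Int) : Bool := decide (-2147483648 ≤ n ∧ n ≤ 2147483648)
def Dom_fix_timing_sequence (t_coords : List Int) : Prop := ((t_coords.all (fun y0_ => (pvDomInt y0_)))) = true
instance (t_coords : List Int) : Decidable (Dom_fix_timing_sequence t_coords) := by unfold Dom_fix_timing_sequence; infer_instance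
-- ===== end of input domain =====

-- B computes the same sequence by divide-and-conquer (fix halves, bump the right
-- half over the left half's last value) instead of A's single pass ("alternative").

-- ===== PORT A =====
-- the 'for i in range(1, len(t_coords))' loop, carrying the fixed_t list
def fixLoopA (t_coords : List Int) (fixed : List Int) (i : Nat) : List Int :=
  if _h : i < t_coords.length then
    let ti := (PySem.List.pyGet? t_coords (i : Int)).getD 0
    let last := (PySem.List.pyGet? fixed (-1)).getD 0
    fixLoopA t_coords (fixed ++ [max ti (last + 1)]) (i + 1)
  else fixed
termination_by t_coords.length - i

def fix_timing_sequence (t_coords : List Int) : List Int :=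
  match t_coords with
  | [] => t_coords
  | t0 :: _ => fixLoopA t_coords [t0] 1

-- ===== PORT B =====
-- the inner 'fix(seg)': fix both halves, then bump the right half's k-th
-- element to at least left[-1] + 1 + k
def fixDC (seg : List Int) : List Int :=
  if _h : seg.length ≤ 1 then seg
  else
    let mid := seg.length / 2
    let left := fixDC (seg.take mid)
    let right := fixDC (seg.drop mid)
    let base := (PySem.List.pyGet? left (-1)).getD 0 + 1
    left ++ right.mapIdx (fun k v => max v (base + (k : Int)))
termination_by seg.length
decreasing_by
  · simp [List.length_take]; omega
  · simp [List.length_drop]; omega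

def fix_timing_sequence_alt (t_coords : List Int) : List Int :=
  match t_coords with
  | [] => t_coords
  | _ :: _ => fixDC t_coords

-- ===== PRECONDITION & SPEC =====
def Spec_fix_timing_sequence (t_coords : List Int) (out : List Int) : Prop := out = fix_timing_sequence_alt t_coords
instance (t_coords : List Int) (out : List Int) : Decidable (Spec_fix_timing_sequence t_coords out) := by unfold Spec_fix_timing_sequence; infer_instance

-- ===== CLAIM (what is proved, stated in full; the proofs are below) =====
def Claim_equal_fix_timing_sequence : Prop := ∀ (t_coords : List Int), Dom_fix_timing_sequence t_coords → Spec_fix_timing_sequence t_coords (fix_timing_sequence t_coords)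

-- ===== LEMMAS AND PROOFS =====

-- reference recursion: next = max t (last+1), carried as 'last'
def goFix (last : Int) : List Int → List Int
  | [] => []
  | t :: rest =>
    let n := max t (last + 1)
    n :: goFix n rest

-- the value carried by goFix after consuming xs
def lastGo (last : Int) : List Int → Int
  | [] => last
  | t :: rest => lastGo (max t (last + 1)) rest

theorem fixLoopA_eq_goFix (t_coords : List Int) :
    ∀ (i : Nat) (fixed : List Int) (h : fixed ≠ []),
      fixLoopA t_coords fixed i = fixed ++ goFix (fixed.getLast h) (t_coords.drop i) := by
  intro i
  induction' hk : t_coords.length - i using Nat.strong_induction_on with k ih generalizing i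
  intro fixed h
  rw [fixLoopA]
  by_cases hi : i < t_coords.length
  · simp only [hi, dif_pos]
    have hget : PySem.List.pyGet? t_coords (i : Int) = some t_coords[i] := by
      simp [hi]
    have hlast : PySem.List.pyGet? fixed (-1) = some (fixed.getLast h) := by
      rw [PySem.List.pyGet?_neg_one, List.getLast?_eq_some_getLast]
    rw [hget, hlast]
    simp only [Option.getD_some]
    have hne : fixed ++ [max t_coords[i] (fixed.getLast h + 1)] ≠ [] := by simp
    rw [ih (t_coords.length - (i + 1)) (by omega) (i + 1) rfl _ hne]
    have hdrop : t_coords.drop i = t_coords[i] :: t_coords.drop (i + 1) :=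
      (List.drop_eq_getElem_cons hi)
    rw [hdrop]
    simp [goFix]
  · simp only [hi, dif_neg, not_false_iff]
    rw [List.drop_of_length_le (by omega)]
    simp [goFix]

theorem goFix_append (xs : List Int) : ∀ (ys : List Int) (last : Int),
    goFix last (xs ++ ys) = goFix last xs ++ goFix (lastGo last xs) ys := by
  induction xs with
  | nil => intro ys last; simp [goFix, lastGo]
  | cons t rest ih => intro ys last; simp [goFix, lastGo, ih]

theorem getLast_goFix : ∀ (xs : List Int) (last : Int) (h : goFix last xs ≠ []),
    (goFix last xs).getLast h = lastGo last xs := by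
  intro xs
  induction xs with
  | nil => intro last h; simp [goFix] at h
  | cons t rest ih =>
    intro last h
    cases rest with
    | nil => simp [goFix, lastGo]
    | cons r rs =>
      simp only [goFix, lastGo]
      rw [List.getLast_cons (by simp)]
      exact ih _ _

-- bumping a fixed sequence = fixing with a raised floor
theorem bump_goFix : ∀ (ys : List Int) (c base : Int),
    (goFix c ys).mapIdx (fun k v => max v (base + (k : Int))) = goFix (max c (base - 1)) ys := by
  intro ys
  induction ys with
  | nil => intro c base; simp [goFix]
  | cons y rest ih =>
    intro c base
    simp only [goFix, List.mapIdx_cons]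
    refine List.cons_eq_cons.mpr ⟨by push_cast; omega, ?_⟩
    have h1 : (fun (i : Nat) (v : Int) => max v (base + ((i + 1 : Nat) : Int)))
        = (fun (k : Nat) (v : Int) => max v ((base + 1) + (k : Int))) := by
      funext k v; push_cast; ring_nf
    rw [h1, ih (max y (c + 1)) (base + 1)]
    have h2 : max (max y (c + 1)) (base + 1 - 1) = max y (max c (base - 1) + 1) := by omega
    rw [h2]

-- an initial floor below head - 1 is absorbed by the head
theorem goFix_absorb (h c : Int) (rest : List Int) :
    goFix (max (h - 1) c) (h :: rest) = goFix c (h :: rest) := by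
  simp only [goFix]
  have h1 : max h (max (h - 1) c + 1) = max h (c + 1) := by omega
  rw [h1]

theorem fixDC_eq_goFix : ∀ (n : Nat) (seg : List Int), seg.length = n → seg ≠ [] →
    fixDC seg = goFix (seg.head?.getD 0 - 1) seg := by
  intro n
  induction n using Nat.strong_induction_on with
  | _ n ih =>
    intro seg hn hne
    rw [fixDC]
    by_cases hlen : seg.length ≤ 1
    · simp only [hlen, dif_pos]
      match seg, hne with
      | [t], _ => simp [goFix]
      | t :: r :: rs, _ => simp at hlen
    · simp only [hlen, dif_neg, not_false_iff]
      have h2 : 2 ≤ seg.length := by omega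
      set mid := seg.length / 2 with hmid
      have hmid1 : 1 ≤ mid := by omega
      have hmidlt : mid < seg.length := by omega
      have htake_len : (seg.take mid).length = mid := by simp; omega
      have hdrop_len : (seg.drop mid).length = seg.length - mid := by simp
      have htne : seg.take mid ≠ [] := by
        intro h; rw [h] at htake_len; simp at htake_len; omega
      have hdne : seg.drop mid ≠ [] := by
        intro h; rw [h] at hdrop_len; simp at hdrop_len; omega
      have hL := ih mid (by omega) (seg.take mid) htake_len htne
      have hR := ih (seg.length - mid) (by omega) (seg.drop mid) hdrop_len hdne
      rw [hL, hR]
      -- heads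
      obtain ⟨x0, xs, hxs⟩ := List.exists_cons_of_ne_nil htne
      obtain ⟨y0, ys, hys⟩ := List.exists_cons_of_ne_nil hdne
      have hhead : seg.head?.getD 0 = x0 := by
        have : seg.head? = (seg.take mid).head? := by
          cases seg with
          | nil => simp at hne
          | cons a l =>
            have : mid = Nat.succ (mid - 1) := by omega
            rw [this]; simp
        rw [this, hxs]; rfl
      -- last of left
      have hLne : goFix ((seg.take mid).head?.getD 0 - 1) (seg.take mid) ≠ [] := by
        rw [hxs]; simp [goFix]
      have hlastL : PySem.List.pyGet? (goFix ((seg.take mid).head?.getD 0 - 1) (seg.take mid)) (-1)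
          = some (lastGo ((seg.take mid).head?.getD 0 - 1) (seg.take mid)) := by
        rw [PySem.List.pyGet?_neg_one, List.getLast?_eq_some_getLast (h := hLne),
            getLast_goFix]
      rw [hlastL]
      simp only [Option.getD_some]
      set c0 := (seg.take mid).head?.getD 0 - 1 with hc0
      set b := lastGo c0 (seg.take mid) + 1 with hb
      rw [bump_goFix]
      have habs : goFix (max ((seg.drop mid).head?.getD 0 - 1) (b - 1)) (seg.drop mid)
          = goFix (b - 1) (seg.drop mid) := by
        rw [hys]
        have : ((y0 :: ys : List Int).head?.getD 0) = y0 := rfl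
        rw [this]
        exact goFix_absorb y0 (b - 1) ys
      rw [habs]
      have hc0x : c0 = x0 - 1 := by rw [hc0, hxs]; rfl
      have hsplit : goFix (x0 - 1) seg
          = goFix (x0 - 1) (seg.take mid) ++ goFix (lastGo (x0 - 1) (seg.take mid)) (seg.drop mid) := by
        conv_lhs => rw [← List.take_append_drop mid seg]
        rw [goFix_append]
      rw [hhead, hsplit, ← hc0x, hb]
      norm_num

-- ===== VERDICT (by name: the statement is the Claim_ definition above) =====
theorem fix_timing_sequence_spec : Claim_equal_fix_timing_sequence := by
  intro t_coords _
  unfold Spec_fix_timing_sequence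
  match t_coords with
  | [] => rfl
  | t0 :: ts =>
    show fixLoopA (t0 :: ts) [t0] 1 = fixDC (t0 :: ts)
    rw [fixLoopA_eq_goFix (t0 :: ts) 1 [t0] (by simp),
        fixDC_eq_goFix (t0 :: ts).length (t0 :: ts) rfl (by simp), List.drop_one]
    simp [goFix]
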